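-- pv_equiv track=rewrite | github.com/anrbn/thmassignment | labs/mock/mockllm.py | split_for_stream
-- ===== SOURCE A (Python) =====
-- def split_for_stream(text: str) -> list[str]:
--     if not text:
--         return [""]
--
--     chunks: list[str] = []
--     words = text.split(" ")
--     for index, word in enumerate(words):
--         suffix = " " if index < len(words) - 1 else ""
--         chunks.append(word + suffix)
--     return chunks
-- ===== SOURCE B (Python) =====
-- def split_for_stream(text: str) -> list[str]:
--     chunks: list[str] = []
--     buf = ""
--     for ch in text:
--         if ch == " ":
--             chunks.append(buf + " ")
--             buf = ""
--         else:
--             buf += ch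
--     chunks.append(buf)
--     return chunks
-- ===== Notes on version B (the rewrite author's own statement) =====
-- stated objective: simpler
-- what changed: Replaces split-then-enumerate-reappend (with a separate empty-text guard) by a single character scan that flushes a buffer at each space and emits the final buffer unconditionally.
import Mathlib
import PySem

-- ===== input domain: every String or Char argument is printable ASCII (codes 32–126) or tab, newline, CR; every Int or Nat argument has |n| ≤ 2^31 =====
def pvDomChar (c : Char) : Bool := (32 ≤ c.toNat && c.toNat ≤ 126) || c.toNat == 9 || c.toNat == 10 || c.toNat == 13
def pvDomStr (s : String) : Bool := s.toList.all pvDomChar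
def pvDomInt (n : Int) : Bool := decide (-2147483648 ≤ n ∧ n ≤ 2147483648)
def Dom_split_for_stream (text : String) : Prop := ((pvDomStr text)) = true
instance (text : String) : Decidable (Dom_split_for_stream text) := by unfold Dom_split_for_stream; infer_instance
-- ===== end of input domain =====

-- B scans the text once: a buffer is flushed (with a trailing space) at each space
-- and the final buffer is emitted unconditionally, so no separate empty-text guard is needed.

-- ===== PORT A =====
-- literal port: guard for empty text, split on " ", then re-append a space to every word but the last
def split_for_stream (text : String) : List String :=
  if text.toList.isEmpty then [""]
  else
    let words := PySem.Chars.splitOn text.toList [' ']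
    (PySem.List.enumerate words 0).foldl
      (fun chunks iw =>
        let suffix : List Char := if iw.1 < (words.length : Int) - 1 then [' '] else []
        chunks ++ [String.ofList (iw.2 ++ suffix)]) []

-- ===== PORT B =====
def split_for_stream_alt (text : String) : List String :=
  let st := text.toList.foldl
    (fun (p : List String × List Char) c =>
      if c = ' ' then (p.1 ++ [String.ofList (p.2 ++ [' '])], []) else (p.1, p.2 ++ [c]))
    ([], [])
  st.1 ++ [String.ofList st.2]

-- ===== PRECONDITION & SPEC =====
def Spec_split_for_stream (text : String) (out : List String) : Prop := out = split_for_stream_alt text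
instance (text : String) (out : List String) : Decidable (Spec_split_for_stream text out) := by unfold Spec_split_for_stream; infer_instance

-- ===== CLAIM (what is proved, stated in full; the proofs are below) =====
def Claim_equal_split_for_stream : Prop := ∀ (text : String), Dom_split_for_stream text → Spec_split_for_stream text (split_for_stream text)

-- ===== LEMMAS AND PROOFS =====

-- recursive split on a single space character
def spSplit : List Char → List (List Char)
  | [] => [[]]
  | c :: r => if c = ' ' then [] :: spSplit r
              else match spSplit r with
                   | [] => [[c]]
                   | h :: t => (c :: h) :: t

lemma spSplit_ne_nil (cs : List Char) : spSplit cs ≠ [] := by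
  cases cs with
  | nil => simp [spSplit]
  | cons c r =>
    simp only [spSplit]
    split
    · simp
    · split <;> simp

-- prepend pre onto the first piece
def consAll (pre : List Char) : List (List Char) → List (List Char)
  | [] => [pre]
  | h :: t => (pre ++ h) :: t

lemma splitOn_go_space (fuel : Nat) (l cur : List Char) (acc : List (List Char))
    (h : l.length ≤ fuel) :
    PySem.Chars.splitOn.go [' '] fuel l cur acc
      = acc.reverse ++ consAll cur.reverse (spSplit l) := by
  induction fuel generalizing l cur acc with
  | zero =>
    have : l = [] := by cases l <;> simp_all
    subst this
    simp [PySem.Chars.splitOn.go, spSplit, consAll]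
  | succ n ih =>
    cases l with
    | nil => simp [PySem.Chars.splitOn.go, spSplit, consAll]
    | cons c rest =>
      by_cases hc : c = ' '
      · subst hc
        rw [show PySem.Chars.splitOn.go [' '] (n+1) (' ' :: rest) cur acc
              = PySem.Chars.splitOn.go [' '] n rest [] (cur.reverse :: acc) by
            simp [PySem.Chars.splitOn.go, List.isPrefixOf]]
        rw [ih rest [] (cur.reverse :: acc) (by simpa using Nat.le_of_succ_le_succ (by simpa using h))]
        obtain ⟨h', t', ht⟩ := List.exists_cons_of_ne_nil (spSplit_ne_nil rest)
        simp [spSplit, ht, consAll]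
      · rw [show PySem.Chars.splitOn.go [' '] (n+1) (c :: rest) cur acc
              = PySem.Chars.splitOn.go [' '] n rest (c :: cur) acc by
            simp [PySem.Chars.splitOn.go, List.isPrefixOf, Ne.symm hc]]
        rw [ih rest (c :: cur) acc (by simpa using Nat.le_of_succ_le_succ (by simpa using h))]
        obtain ⟨h', t', ht⟩ := List.exists_cons_of_ne_nil (spSplit_ne_nil rest)
        simp [spSplit, ht, consAll, hc]

lemma splitOn_space (cs : List Char) :
    PySem.Chars.splitOn cs [' '] = spSplit cs := by
  rw [PySem.Chars.splitOn, splitOn_go_space _ _ _ _ (by omega)]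
  obtain ⟨h', t', ht⟩ := List.exists_cons_of_ne_nil (spSplit_ne_nil cs)
  simp [ht, consAll]

-- words with a space re-appended to every piece but the last
def withSpaces : List (List Char) → List String
  | [] => []
  | [w] => [String.ofList w]
  | w :: ws => String.ofList (w ++ [' ']) :: withSpaces ws

lemma foldl_enumerate_withSpaces (N : Nat) (ws : List (List Char)) (s : Int)
    (acc : List String) (hN : s + ws.length = (N : Int)) :
    (PySem.List.enumerate ws s).foldl
      (fun chunks iw =>
        chunks ++ [String.ofList (iw.2 ++ if iw.1 < (N : Int) - 1 then [' '] else [])]) acc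
      = acc ++ withSpaces ws := by
  induction ws generalizing s acc with
  | nil => simp [PySem.List.enumerate_nil, withSpaces]
  | cons w rest ih =>
    rw [PySem.List.enumerate_cons]
    simp only [List.foldl_cons]
    cases rest with
    | nil =>
      have : ¬ (s < (N : Int) - 1) := by simp at hN; omega
      simp [PySem.List.enumerate_nil, this, withSpaces]
    | cons w2 rest2 =>
      have hlt : s < (N : Int) - 1 := by simp at hN; omega
      rw [ih (s + 1) _ (by simp at hN ⊢; omega)]
      simp [hlt, withSpaces]

lemma foldB (cs : List Char) (acc : List String) (buf : List Char) :
    (let st := cs.foldl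
        (fun (p : List String × List Char) c =>
          if c = ' ' then (p.1 ++ [String.ofList (p.2 ++ [' '])], []) else (p.1, p.2 ++ [c]))
        (acc, buf)
     st.1 ++ [String.ofList st.2])
      = acc ++ withSpaces (consAll buf (spSplit cs)) := by
  induction cs generalizing acc buf with
  | nil => simp [spSplit, consAll, withSpaces]
  | cons c r ih =>
    by_cases hc : c = ' '
    · subst hc
      simp only [List.foldl_cons]
      rw [ih]
      obtain ⟨h', t', ht⟩ := List.exists_cons_of_ne_nil (spSplit_ne_nil r)
      simp [spSplit, ht, consAll, withSpaces]
    · simp only [List.foldl_cons, if_neg hc]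
      rw [ih]
      obtain ⟨h', t', ht⟩ := List.exists_cons_of_ne_nil (spSplit_ne_nil r)
      simp [spSplit, ht, consAll, hc]

lemma alt_eq (text : String) :
    split_for_stream_alt text = withSpaces (spSplit text.toList) := by
  have := foldB text.toList [] []
  simp only at this
  rw [split_for_stream_alt, this]
  obtain ⟨h', t', ht⟩ := List.exists_cons_of_ne_nil (spSplit_ne_nil text.toList)
  simp [ht, consAll]

-- ===== VERDICT (by name: the statement is the Claim_ definition above) =====
theorem split_for_stream_spec : Claim_equal_split_for_stream := by
  intro text _
  show split_for_stream text = split_for_stream_alt text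
  rw [alt_eq, split_for_stream]
  by_cases he : text.toList.isEmpty
  · have : text.toList = [] := by simpa using he
    simp [this, spSplit, withSpaces]
  · simp only [he, splitOn_space]
    rw [foldl_enumerate_withSpaces (spSplit text.toList).length _ 0 [] (by simp)]
    simp
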